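-- pv_equiv track=rewrite | github.com/deepakrawat72/problem_solving | algorithms/lists/stickler_thief_problem.py | max_amount_robbed
-- ===== SOURCE A (Python) =====
-- def max_amount_robbed(arr, n):
--     if n < 0:
--         return 0
--     if n == 0:
--         return arr[0]
--
--     pick = arr[n] + max_amount_robbed(arr, n - 2)
--     not_pick = max_amount_robbed(arr, n - 1)
--
--     return max(pick, not_pick)
-- ===== SOURCE B (Python) =====
-- def max_amount_robbed(arr, n):
--     if n < 0:
--         return 0
--     prev2, prev1 = 0, arr[0]
--     for i in range(1, n + 1):
--         prev2, prev1 = prev1, max(arr[i] + prev2, prev1)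
--     return prev1
-- ===== Notes on version B (the rewrite author's own statement) =====
-- stated objective: faster
-- what changed: replaced the exponential top-down recursion with a single bottom-up loop keeping two rolling values (the best sums up to i-1 and i)
import Mathlib
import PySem

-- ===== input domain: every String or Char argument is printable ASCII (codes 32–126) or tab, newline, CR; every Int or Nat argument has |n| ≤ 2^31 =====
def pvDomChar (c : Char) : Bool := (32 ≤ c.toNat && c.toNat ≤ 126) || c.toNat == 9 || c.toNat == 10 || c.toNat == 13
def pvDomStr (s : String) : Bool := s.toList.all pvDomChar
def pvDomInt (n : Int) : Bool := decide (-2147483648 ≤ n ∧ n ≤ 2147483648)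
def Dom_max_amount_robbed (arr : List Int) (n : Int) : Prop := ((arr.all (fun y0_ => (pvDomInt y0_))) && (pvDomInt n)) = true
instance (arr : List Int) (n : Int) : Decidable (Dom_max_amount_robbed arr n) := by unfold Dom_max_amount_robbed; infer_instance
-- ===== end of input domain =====

-- B replaces A's exponential top-down recursion with a bottom-up two-variable rolling loop (faster, asymptotic).

-- ===== PORT A =====
-- literal port of A's recursion; arr[...] via pyGetD (exact under Pre_, which puts the IndexError cases outside)
def max_amount_robbed (arr : List Int) (n : Int) : Int :=
  if n < 0 then 0
  else if n = 0 then PySem.List.pyGetD arr 0 0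
  else
    let pick := PySem.List.pyGetD arr n 0 + max_amount_robbed arr (n - 2)
    let not_pick := max_amount_robbed arr (n - 1)
    max pick not_pick
termination_by n.toNat
decreasing_by all_goals omega

-- ===== PORT B =====
def max_amount_robbed_alt (arr : List Int) (n : Int) : Int :=
  if n < 0 then 0
  else
    ((PySem.List.pyRange 1 (n + 1) 1).foldl
      (fun (s : Int × Int) i => (s.2, max (PySem.List.pyGetD arr i 0 + s.1) s.2))
      (0, PySem.List.pyGetD arr 0 0)).2

-- ===== PRECONDITION & SPEC =====
-- Pre_ excludes exactly the inputs where Python A raises IndexError: n ≥ len(arr) (for n ≥ 0 the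
-- recursion reads arr[n], …, arr[0], so n < len(arr) suffices; for n < 0 A returns 0 unconditionally).
def Pre_max_amount_robbed (arr : List Int) (n : Int) : Prop := n < (arr.length : Int)
instance (arr : List Int) (n : Int) : Decidable (Pre_max_amount_robbed arr n) := by unfold Pre_max_amount_robbed; infer_instance
def pvWitness_max_amount_robbed : List Int × Int := ([3, 2, 5, 1], 3)
def Spec_max_amount_robbed (arr : List Int) (n : Int) (out : Int) : Prop := out = max_amount_robbed_alt arr n
instance (arr : List Int) (n : Int) (out : Int) : Decidable (Spec_max_amount_robbed arr n out) := by unfold Spec_max_amount_robbed; infer_instance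

-- ===== CLAIM (what is proved, stated in full; the proofs are below) =====
def Claim_equal_max_amount_robbed : Prop := ∀ (arr : List Int) (n : Int), Dom_max_amount_robbed arr n → Pre_max_amount_robbed arr n → Spec_max_amount_robbed arr n (max_amount_robbed arr n)

-- ===== LEMMAS AND PROOFS =====

theorem mar_neg (arr : List Int) (n : Int) (h : n < 0) : max_amount_robbed arr n = 0 := by
  rw [max_amount_robbed]; simp [h]

-- loop invariant: after processing indices 1..k the state is (A (k-1), A k)
theorem mar_loop (arr : List Int) (k : Nat) (hk : (k : Int) < arr.length) :
    (PySem.List.pyRange 1 ((k : Int) + 1) 1).foldl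
      (fun (s : Int × Int) i => (s.2, max (PySem.List.pyGetD arr i 0 + s.1) s.2))
      (0, PySem.List.pyGetD arr 0 0)
    = (max_amount_robbed arr ((k : Int) - 1), max_amount_robbed arr (k : Int)) := by
  induction k with
  | zero =>
      simp [PySem.List.pyRange_one_eq_nil (by omega : (1:Int) ≤ 1)]
      constructor
      · rw [mar_neg arr _ (by omega)]
      · rw [max_amount_robbed]; simp
  | succ m ih =>
      have hm : (m : Int) < arr.length := by push_cast at hk ⊢; omega
      have hsplit : PySem.List.pyRange 1 (((m : Nat) + 1 : Nat) + 1) 1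
          = PySem.List.pyRange 1 ((m : Int) + 1) 1 ++ [(m : Int) + 1] := by
        push_cast
        exact PySem.List.pyRange_one_succ_right (by omega)
      push_cast at hsplit ⊢
      rw [hsplit, List.foldl_append, ih hm]
      simp only [List.foldl_cons, List.foldl_nil]
      have hA : max_amount_robbed arr ((m : Int) + 1)
          = max (PySem.List.pyGetD arr ((m : Int) + 1) 0 + max_amount_robbed arr ((m : Int) - 1))
                (max_amount_robbed arr (m : Int)) := by
        rw [max_amount_robbed]
        have h1 : ¬ ((m : Int) + 1 < 0) := by omega
        have h2 : ((m : Int) + 1) ≠ 0 := by omega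
        simp only [h1, if_false, h2, if_false]
        have e : (m : Int) + 1 - 2 = (m : Int) - 1 := by ring
        rw [e, show (m : Int) + 1 - 1 = (m : Int) from by ring]
      have e1 : (m : Int) + 1 - 1 = (m : Int) := by ring
      rw [e1, hA]

theorem max_amount_robbed_spec : Claim_equal_max_amount_robbed := by
  intro arr n _ hpre
  unfold Spec_max_amount_robbed max_amount_robbed_alt
  by_cases hn : n < 0
  · simp [hn, mar_neg arr n hn]
  · simp only [hn, if_false]
    have hk : n = ((n.toNat : Nat) : Int) := by omega
    rw [hk, mar_loop arr n.toNat (by unfold Pre_max_amount_robbed at hpre; omega)]
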